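-- pv_equiv track=rewrite | github.com/max7969/adventofcode2023 | day10/day10.py | transform_to_large_map
-- ===== SOURCE A (Python) =====
-- def transform_to_large_map(content):
--     large_map = []
--     originals = []
--     transform_dict = {
--         "-": ("...", "---", "..."),
--         "|": (".|.", ".|.", ".|."),
--         "F": ("...", ".F-", ".|."),
--         "7": ("...", "-7.", ".|."),
--         "J": (".|.", "-J.", "..."),
--         "L": (".|.", ".L-", "..."),
--         "S": (".|.", "-S-", ".|."),
--     }
--     for i, line in enumerate(content):
--         line = line.replace("\n", "")
--         line0, line1, line2 = "", "", ""
--         for j, element in enumerate(line):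
--             transform = transform_dict.get(element, ("...", "...", "..."))
--             line0 += transform[0]
--             line1 += transform[1]
--             line2 += transform[2]
--             originals.append(f"{i * 3 + 1},{j * 3 + 1}")
--         large_map.extend([line0, line1, line2])
--     return large_map, set(originals)
-- ===== SOURCE B (Python) =====
-- _DIRS = {"-": "EW", "|": "NS", "F": "SE", "7": "SW", "J": "NW", "L": "NE", "S": "NSEW"}
--
--
-- def _tile_row(c, r):
--     d = _DIRS[c]
--     if r == 0:
--         return "." + ("|" if "N" in d else ".") + "."
--     if r == 1:
--         return ("-" if "W" in d else ".") + c + ("-" if "E" in d else ".")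
--     return "." + ("|" if "S" in d else ".") + "."
--
--
-- def _table(r):
--     t = {chr(k): "..." for k in range(128)}
--     t.update({c: _tile_row(c, r) for c in _DIRS})
--     return str.maketrans(t)
--
--
-- _TABLES = tuple(_table(r) for r in range(3))
--
--
-- def transform_to_large_map(content):
--     lines = [line.replace("\n", "") for line in content]
--     large_map = [line.translate(t) for line in lines for t in _TABLES]
--     originals = {f"{3 * i + 1},{3 * j + 1}" for i, line in enumerate(lines) for j in range(len(line))}
--     return large_map, originals
-- ===== Notes on version B (the rewrite author's own statement) =====
-- stated objective: alternative
-- what changed: B precomputes three full 128-entry translation tables once (derived from per-char connection-direction sets) and builds the output in staged passes: a strip pass over the lines, one str.translate library call per output row with no per-character Python loop, and the originals set computed from line lengths alone by a comprehension over index ranges — replacing A's single fused per-character loop that accumulates three rows and the originals together.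
import Mathlib
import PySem

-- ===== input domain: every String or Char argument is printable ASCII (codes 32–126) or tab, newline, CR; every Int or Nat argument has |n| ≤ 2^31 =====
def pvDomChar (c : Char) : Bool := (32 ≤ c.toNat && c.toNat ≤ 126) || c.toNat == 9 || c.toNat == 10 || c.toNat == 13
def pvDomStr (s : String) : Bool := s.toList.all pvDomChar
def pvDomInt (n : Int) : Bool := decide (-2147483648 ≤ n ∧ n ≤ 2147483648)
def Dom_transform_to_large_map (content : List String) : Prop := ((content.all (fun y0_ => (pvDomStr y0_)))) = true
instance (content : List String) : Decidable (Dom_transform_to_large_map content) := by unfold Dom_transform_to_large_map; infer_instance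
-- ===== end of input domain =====

-- B replaces A's fused per-character loop by staged passes: three precomputed 128-entry
-- translation tables (built from connection-direction sets), one translate pass per output row,
-- and the originals set computed from line lengths alone. Alternative structure, same cost.

-- ===== PORT A =====
-- transform_dict: each pipe char ↦ its three-row 3x3 block (rows as List Char; Python 3-char strings)
def pvTransA : PySem.Dict Char (List Char × List Char × List Char) :=
  PySem.Dict.ofList
    [ ('-', (['.','.','.'], ['-','-','-'], ['.','.','.'])),
      ('|', (['.','|','.'], ['.','|','.'], ['.','|','.'])),
      ('F', (['.','.','.'], ['.','F','-'], ['.','|','.'])),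
      ('7', (['.','.','.'], ['-','7','.'], ['.','|','.'])),
      ('J', (['.','|','.'], ['-','J','.'], ['.','.','.'])),
      ('L', (['.','|','.'], ['.','L','-'], ['.','.','.'])),
      ('S', (['.','|','.'], ['-','S','-'], ['.','|','.'])) ]

-- the .get default ("...", "...", "...")
def pvDflt : List Char × List Char × List Char := (['.','.','.'], ['.','.','.'], ['.','.','.'])

-- f"{i * 3 + 1},{j * 3 + 1}"
def pvTagA (i j : Int) : String :=
  String.ofList (PySem.Int.toChars (i * 3 + 1) ++ ',' :: PySem.Int.toChars (j * 3 + 1))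

-- the body of A's outer loop: inner loop over enumerate(line) accumulating (line0, line1, line2, originals),
-- then large_map.extend([line0, line1, line2])
def pvStepA (st : List String × List String) (il : Int × String) : List String × List String :=
  let inner := (PySem.List.enumerate (PySem.Str.replace il.2 "\n" "").toList).foldl
    (fun (s : List Char × List Char × List Char × List String) je =>
      (s.1 ++ (pvTransA.getD je.2 pvDflt).1, s.2.1 ++ (pvTransA.getD je.2 pvDflt).2.1,
       s.2.2.1 ++ (pvTransA.getD je.2 pvDflt).2.2, s.2.2.2 ++ [pvTagA il.1 je.1]))
    ([], [], [], st.2)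
  (st.1 ++ [String.ofList inner.1, String.ofList inner.2.1, String.ofList inner.2.2.1], inner.2.2.2)

def transform_to_large_map (content : List String) : List String × List String :=
  let r := (PySem.List.enumerate content).foldl pvStepA ([], [])
  (r.1, PySem.Set.ofList r.2)

-- ===== PORT B =====
-- _DIRS: each pipe char ↦ the directions it connects to
def pvDirsB : PySem.Dict Char String :=
  PySem.Dict.ofList
    [ ('-', "EW"), ('|', "NS"), ('F', "SE"), ('7', "SW"),
      ('J', "NW"), ('L', "NE"), ('S', "NSEW") ]

-- _tile_row(c, r): row r of c's 3x3 tile, computed from its connection directions (c always a key of _DIRS)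
def pvTileRowB (c : Char) (r : Nat) : List Char :=
  let d := pvDirsB.getD c ""
  if r = 0 then ['.', if PySem.Str.isIn "N" d then '|' else '.', '.']
  else if r = 1 then
    [if PySem.Str.isIn "W" d then '-' else '.', c, if PySem.Str.isIn "E" d then '-' else '.']
  else ['.', if PySem.Str.isIn "S" d then '|' else '.', '.']

-- _table(r): {chr(k): "..." for k in range(128)} then t.update({c: _tile_row(c, r) for c in _DIRS});
-- str.maketrans kept as the Char-keyed dict itself (all keys are single chars, values strings)
def pvBaseB : PySem.Dict Char (List Char) :=
  (PySem.List.pyRange 0 128 1).foldl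
    (fun t k => t.insert (Char.ofNat k.toNat) ['.','.','.']) PySem.Dict.empty

def pvTableB (r : Nat) : PySem.Dict Char (List Char) :=
  pvDirsB.keys.foldl (fun t c => t.insert c (pvTileRowB c r)) pvBaseB

-- _TABLES = tuple(_table(r) for r in range(3))
def pvTables : List (PySem.Dict Char (List Char)) := [pvTableB 0, pvTableB 1, pvTableB 2]

-- line.translate(t): each char replaced by its table entry, unmapped chars pass through (exact for
-- this table: every key is one char, every value a string)
def pvTranslate (t : PySem.Dict Char (List Char)) (s : String) : String :=
  String.ofList (s.toList.flatMap (fun c => t.getD c [c]))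

-- f"{3 * i + 1},{3 * j + 1}"
def pvTagB (i j : Int) : String :=
  String.ofList (PySem.Int.toChars (3 * i + 1) ++ ',' :: PySem.Int.toChars (3 * j + 1))

def transform_to_large_map_alt (content : List String) : List String × List String :=
  let lines := content.map (fun line => PySem.Str.replace line "\n" "")
  let large_map := lines.flatMap (fun line => pvTables.map (fun t => pvTranslate t line))
  let originals := PySem.Set.ofList ((PySem.List.enumerate lines).flatMap
    (fun il => (PySem.List.pyRange 0 (PySem.Str.len il.2) 1).map (fun j => pvTagB il.1 j)))
  (large_map, originals)

-- ===== PRECONDITION & SPEC =====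
def Spec_transform_to_large_map (content : List String) (out : List String × List String) : Prop := out = transform_to_large_map_alt content
instance (content : List String) (out : List String × List String) : Decidable (Spec_transform_to_large_map content out) := by unfold Spec_transform_to_large_map; infer_instance

-- ===== CLAIM =====
def Claim_equal_transform_to_large_map : Prop := ∀ (content : List String), Dom_transform_to_large_map content → Spec_transform_to_large_map content (transform_to_large_map content)

-- ===== LEMMAS AND PROOFS =====

theorem pvToNat_ofNat (m : Nat) (h : m < 55296) : (Char.ofNat m).toNat = m := by
  rw [Char.toNat_ofNat, if_pos]; exact Or.inl h

theorem pvOfNat_inj (a b : Nat) (ha : a < 128) (hb : b < 128) (h : Char.ofNat a = Char.ofNat b) :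
    a = b := by
  have := congrArg Char.toNat h
  rwa [pvToNat_ofNat a (by omega), pvToNat_ofNat b (by omega)] at this

theorem base_items :
    pvBaseB.items = (PySem.List.pyRange 0 128 1).map (fun k => (Char.ofNat k.toNat, ['.','.','.'])) := by
  have h128 : (128 : Int) = ((128 : Nat) : Int) := by norm_num
  unfold pvBaseB
  rw [PySem.Dict.items_foldl_insert_fresh _ (fun k : Int => Char.ofNat k.toNat)
      (fun _ => ['.','.','.'])]
  · rfl
  · intro a _; rfl
  · rw [h128, PySem.List.pyRange_zero_natCast, List.map_map]
    have hcomp : ((fun k : Int => Char.ofNat k.toNat) ∘ (fun k : Nat => (k : Int)))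
        = fun k : Nat => Char.ofNat k := by
      funext k; simp
    rw [hcomp]
    refine List.Nodup.map_on ?_ (List.nodup_range)
    intro a ha b hb hfe
    exact pvOfNat_inj a b (by simp at ha; omega) (by simp at hb; omega) hfe

theorem base_nodup_keys : pvBaseB.keys.Nodup := by
  unfold pvBaseB
  exact PySem.Dict.nodup_keys_foldl_insert_key _ (fun k : Int => Char.ofNat k.toNat)
    (fun _ _ => ['.','.','.']) _ PySem.Dict.nodup_keys_empty

theorem base_getD (c : Char) (h : c.toNat < 128) (d0 : List Char) :
    pvBaseB.getD c d0 = ['.','.','.'] := by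
  apply PySem.Dict.getD_of_mem_items _ ?_ base_nodup_keys
  rw [base_items]
  refine List.mem_map.mpr ⟨((c.toNat : Nat) : Int), ?_, ?_⟩
  · rw [PySem.List.mem_pyRange_one]
    constructor
    · exact_mod_cast Nat.zero_le _
    · exact_mod_cast h
  · simp [Char.ofNat_toNat]

theorem dom_lt_128 (c : Char) (h : pvDomChar c = true) : c.toNat < 128 := by
  simp [pvDomChar] at h; omega

theorem keysDirs : pvDirsB.keys = ['-','|','F','7','J','L','S'] := by decide

theorem tableB_getD (r : Nat) (c : Char) (h : c.toNat < 128) (d0 : List Char) :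
    (pvTableB r).getD c d0 =
      if c = '-' ∨ c = '|' ∨ c = 'F' ∨ c = '7' ∨ c = 'J' ∨ c = 'L' ∨ c = 'S'
      then pvTileRowB c r else ['.','.','.'] := by
  unfold pvTableB
  rw [keysDirs]
  simp only [List.foldl_cons, List.foldl_nil]
  rw [PySem.Dict.getD_insert, PySem.Dict.getD_insert, PySem.Dict.getD_insert,
    PySem.Dict.getD_insert, PySem.Dict.getD_insert, PySem.Dict.getD_insert,
    PySem.Dict.getD_insert]
  by_cases h1 : c = 'S'; · simp [h1]
  by_cases h2 : c = 'L'; · simp [h2]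
  by_cases h3 : c = 'J'; · simp [h3]
  by_cases h4 : c = '7'; · simp [h4]
  by_cases h5 : c = 'F'; · simp [h5]
  by_cases h6 : c = '|'; · simp [h6]
  by_cases h7 : c = '-'; · simp [h7]
  simp [h1, h2, h3, h4, h5, h6, h7, base_getD c h]

theorem transA_literal : pvTransA = PySem.Dict.mk
    [ ('-', (['.','.','.'], ['-','-','-'], ['.','.','.'])),
      ('|', (['.','|','.'], ['.','|','.'], ['.','|','.'])),
      ('F', (['.','.','.'], ['.','F','-'], ['.','|','.'])),
      ('7', (['.','.','.'], ['-','7','.'], ['.','|','.'])),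
      ('J', (['.','|','.'], ['-','J','.'], ['.','.','.'])),
      ('L', (['.','|','.'], ['.','L','-'], ['.','.','.'])),
      ('S', (['.','|','.'], ['-','S','-'], ['.','|','.'])) ] := by decide

theorem tbl_ascii (c : Char) (h : c.toNat < 128) :
    (pvTableB 0).getD c [c] = (pvTransA.getD c pvDflt).1 ∧
    (pvTableB 1).getD c [c] = (pvTransA.getD c pvDflt).2.1 ∧
    (pvTableB 2).getD c [c] = (pvTransA.getD c pvDflt).2.2 := by
  rw [tableB_getD 0 c h, tableB_getD 1 c h, tableB_getD 2 c h]
  by_cases h1 : c = '-'; · subst h1; refine ⟨?_, ?_, ?_⟩ <;> decide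
  by_cases h2 : c = '|'; · subst h2; refine ⟨?_, ?_, ?_⟩ <;> decide
  by_cases h3 : c = 'F'; · subst h3; refine ⟨?_, ?_, ?_⟩ <;> decide
  by_cases h4 : c = '7'; · subst h4; refine ⟨?_, ?_, ?_⟩ <;> decide
  by_cases h5 : c = 'J'; · subst h5; refine ⟨?_, ?_, ?_⟩ <;> decide
  by_cases h6 : c = 'L'; · subst h6; refine ⟨?_, ?_, ?_⟩ <;> decide
  by_cases h7 : c = 'S'; · subst h7; refine ⟨?_, ?_, ?_⟩ <;> decide
  have hA : pvTransA.getD c pvDflt = pvDflt := by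
    apply PySem.Dict.getD_of_not_contains
    rw [transA_literal, PySem.Dict.contains_mk]
    simp only [List.any_eq_false]
    intro p hp
    simp only [List.mem_cons, List.not_mem_nil, or_false] at hp
    rcases hp with h' | h' | h' | h' | h' | h' | h' <;>
      (subst h'; simp [beq_iff_eq, h1, h2, h3, h4, h5, h6, h7, Ne.symm])
  rw [hA]
  simp [h1, h2, h3, h4, h5, h6, h7, pvDflt]

-- chars of line.replace("\n", "") come from the line
theorem replace_go_subset (old : List Char) (fuel : Nat) :
    ∀ (l acc : List Char) (c : Char), c ∈ PySem.Chars.replace.go old [] fuel l acc → c ∈ acc ∨ c ∈ l := by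
  induction fuel with
  | zero =>
      intro l acc c h
      rw [PySem.Chars.replace.go.eq_def] at h
      simpa using h
  | succ n ih =>
      intro l acc c h
      cases l with
      | nil =>
          rw [PySem.Chars.replace.go.eq_def] at h
          simp at h; exact Or.inl h
      | cons x t =>
          rw [PySem.Chars.replace.go.eq_def] at h
          by_cases hp : old.isPrefixOf (x :: t) = true
          · simp only [hp, if_true, List.reverse_nil, List.nil_append] at h
            rcases ih _ _ _ h with h' | h'
            · exact Or.inl h'
            · exact Or.inr (List.mem_of_mem_drop h')
          · simp only [hp] at h
            rcases ih _ _ _ h with h' | h'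
            · rcases List.mem_cons.mp h' with h'' | h''
              · exact Or.inr (by simp [h''])
              · exact Or.inl h''
            · exact Or.inr (List.mem_cons_of_mem _ h')

theorem replace_newline_subset (s : List Char) (c : Char)
    (h : c ∈ PySem.Chars.replace s ['\n'] []) : c ∈ s := by
  rw [PySem.Chars.replace] at h
  simp only [List.isEmpty_cons, Bool.false_eq_true, if_false] at h
  rcases replace_go_subset ['\n'] s.length s [] c h with h' | h'
  · simp at h'
  · exact h'

-- translate with each table equals A's per-char row concatenation, for ASCII input
theorem translate_eq (cs : List Char) (hd : ∀ c ∈ cs, c.toNat < 128) :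
    cs.flatMap (fun c => (pvTableB 0).getD c [c]) = cs.flatMap (fun c => (pvTransA.getD c pvDflt).1) ∧
    cs.flatMap (fun c => (pvTableB 1).getD c [c]) = cs.flatMap (fun c => (pvTransA.getD c pvDflt).2.1) ∧
    cs.flatMap (fun c => (pvTableB 2).getD c [c]) = cs.flatMap (fun c => (pvTransA.getD c pvDflt).2.2) := by
  induction cs with
  | nil => refine ⟨?_, ?_, ?_⟩ <;> simp only [List.flatMap_nil]
  | cons x xs ih =>
      have hx := tbl_ascii x (hd x (by simp))
      have hxs := ih (fun c hc => hd c (List.mem_cons_of_mem _ hc))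
      refine ⟨?_, ?_, ?_⟩ <;>
        simp only [List.flatMap_cons, hx.1, hx.2.1, hx.2.2, hxs.1, hxs.2.1, hxs.2.2]

-- A's inner character loop, characterised
theorem innerA_eq (i : Int) (cs : List Char) (n : Int) (a b c : List Char) (o : List String) :
    (PySem.List.enumerate cs n).foldl
      (fun (s : List Char × List Char × List Char × List String) je =>
        (s.1 ++ (pvTransA.getD je.2 pvDflt).1, s.2.1 ++ (pvTransA.getD je.2 pvDflt).2.1,
         s.2.2.1 ++ (pvTransA.getD je.2 pvDflt).2.2, s.2.2.2 ++ [pvTagA i je.1]))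
      (a, b, c, o)
    = (a ++ cs.flatMap (fun ch => (pvTransA.getD ch pvDflt).1),
       b ++ cs.flatMap (fun ch => (pvTransA.getD ch pvDflt).2.1),
       c ++ cs.flatMap (fun ch => (pvTransA.getD ch pvDflt).2.2),
       o ++ (PySem.List.enumerate cs n).map (fun je => pvTagA i je.1)) := by
  induction cs generalizing n a b c o with
  | nil => simp [PySem.List.enumerate_nil]
  | cons x xs ih =>
      rw [PySem.List.enumerate_cons, List.foldl_cons, ih]
      simp [List.append_assoc]

theorem tag_eq (i j : Int) : pvTagA i j = pvTagB i j := by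
  simp [pvTagA, pvTagB, Int.mul_comm]

theorem tags_eq (i : Int) (cs : List Char) :
    (PySem.List.enumerate cs 0).map (fun je => pvTagA i je.1)
      = (PySem.List.pyRange 0 cs.length 1).map (fun j => pvTagB i j) := by
  calc (PySem.List.enumerate cs 0).map (fun je => pvTagA i je.1)
      = ((PySem.List.enumerate cs 0).map (·.1)).map (fun j => pvTagA i j) := by
        rw [List.map_map]; rfl
    _ = (PySem.List.pyRange 0 cs.length 1).map (fun j => pvTagB i j) := by
        rw [PySem.List.map_fst_enumerate]; simp [tag_eq]

-- the whole outer loop of A against B's staged closed form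
theorem main_eq (cnt : List String) :
    ∀ (n : Int) (L O : List String), (∀ s ∈ cnt, pvDomStr s = true) →
    (PySem.List.enumerate cnt n).foldl pvStepA (L, O) =
      (L ++ (cnt.map (fun line => PySem.Str.replace line "\n" "")).flatMap
              (fun line => pvTables.map (fun t => pvTranslate t line)),
       O ++ (PySem.List.enumerate (cnt.map (fun line => PySem.Str.replace line "\n" "")) n).flatMap
              (fun il => (PySem.List.pyRange 0 (PySem.Str.len il.2) 1).map (fun j => pvTagB il.1 j))) := by
  induction cnt with
  | nil => intro n L O _; simp [PySem.List.enumerate_nil]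
  | cons s rest ih =>
      intro n L O hdom
      have hs : pvDomStr s = true := hdom s (by simp)
      have hlt : ∀ c ∈ (PySem.Str.replace s "\n" "").toList, c.toNat < 128 := by
        intro c hc
        have hmem : c ∈ s.toList := by
          apply replace_newline_subset
          simpa [PySem.Str.toList_replace] using hc
        exact dom_lt_128 c (by simpa [pvDomStr, List.all_eq_true] using (List.all_eq_true.mp hs) c hmem)
      rw [List.map_cons, PySem.List.enumerate_cons, PySem.List.enumerate_cons,
        List.foldl_cons, List.flatMap_cons, List.flatMap_cons]
      have ht := translate_eq (PySem.Str.replace s "\n" "").toList hlt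
      have hstep : pvStepA (L, O) (n, s) =
          (L ++ pvTables.map (fun t => pvTranslate t (PySem.Str.replace s "\n" "")),
           O ++ (PySem.List.pyRange 0 (PySem.Str.len (PySem.Str.replace s "\n" "")) 1).map
                  (fun j => pvTagB n j)) := by
        simp only [pvStepA, innerA_eq, List.nil_append]
        rw [← ht.1, ← ht.2.1, ← ht.2.2, tags_eq]
        simp [pvTables, pvTranslate, PySem.Str.len]
      rw [hstep, ih (n + 1) _ _ (fun s hsm => hdom s (List.mem_cons_of_mem _ hsm))]
      simp [List.append_assoc]

-- ===== VERDICT =====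
theorem transform_to_large_map_spec : Claim_equal_transform_to_large_map := by
  intro content hdom
  show transform_to_large_map content = transform_to_large_map_alt content
  have hd : ∀ s ∈ content, pvDomStr s = true := by
    simpa [Dom_transform_to_large_map, List.all_eq_true] using hdom
  simp only [transform_to_large_map, transform_to_large_map_alt,
    main_eq content 0 [] [] hd, List.nil_append]
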